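-- pv_equiv track=rewrite | github.com/danie1Lin/cracking-code-interview | ch08/p8_permutations_with_dup.py | permutation_form_counts
-- ===== SOURCE A (Python) =====
-- from typing import Dict
--
-- def permutation_form_counts(counts: Dict[str, int]) -> list[str]:
--     all_zero = True
--     for count in counts.values():
--         if count != 0:
--             all_zero = False
--     if all_zero:
--         return [""]
--     result = []
--     for char, count in counts.items():
--         if count == 0:
--             continue
--         counts[char] -= 1
--         sub_results = permutation_form_counts(counts)
--         counts[char] += 1
--         for sub_result in sub_results:
--             result.append(char + sub_result)
--     return result
-- ===== SOURCE B (Python) =====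
-- def permutation_form_counts(counts):
--     total = sum(counts.values())
--     frontier = [("", dict(counts))]
--     for _ in range(total):
--         nxt = []
--         for prefix, rem in frontier:
--             for char, count in rem.items():
--                 if count > 0:
--                     rem2 = dict(rem)
--                     rem2[char] = count - 1
--                     nxt.append((prefix + char, rem2))
--         frontier = nxt
--     return [prefix for prefix, _ in frontier]
-- ===== Notes on version B (the rewrite author's own statement) =====
-- stated objective: alternative
-- what changed: B is iterative: it expands a frontier of (prefix, remaining-counts) pairs level by level for sum(counts.values()) rounds (copying the dict per child instead of mutate-and-restore), whereas A recursively prepends each char to the sub-results of a decremented dict.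
import Mathlib
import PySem

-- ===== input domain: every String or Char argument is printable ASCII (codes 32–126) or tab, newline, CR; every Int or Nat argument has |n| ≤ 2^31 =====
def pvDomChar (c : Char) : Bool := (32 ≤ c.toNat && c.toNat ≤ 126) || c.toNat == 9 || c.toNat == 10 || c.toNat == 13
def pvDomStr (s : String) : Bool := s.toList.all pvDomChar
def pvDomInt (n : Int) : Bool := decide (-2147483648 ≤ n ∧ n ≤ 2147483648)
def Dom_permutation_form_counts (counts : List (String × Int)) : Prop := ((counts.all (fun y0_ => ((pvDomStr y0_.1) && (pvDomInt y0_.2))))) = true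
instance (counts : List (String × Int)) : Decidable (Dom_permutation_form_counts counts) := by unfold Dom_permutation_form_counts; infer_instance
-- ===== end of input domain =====

-- B replaces A's recursion by an iterative breadth-first expansion: a frontier of
-- (prefix, remaining-counts) pairs is advanced sum(values) times, copying the dict per child
-- instead of A's mutate-and-restore ("alternative", same cost).
-- A mutates its dict only temporarily (decrement then restore), so the caller sees no net mutation; B never mutates it.

-- ===== PORT A =====
-- counts[char] -= 1 on the dict = decrement the value of the first (unique) matching key
def pvDecA (c : String) : List (String × Int) → List (String × Int)
  | [] => []
  | (k, v) :: t => if k = c then (k, v - 1) :: t else (k, v) :: pvDecA c t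

-- fuel = total count + 1 is a totality guard only; under Pre_ it always suffices (Python recursion depth)
def pvA : Nat → List (String × Int) → List String
  | 0, _ => []
  | fuel + 1, counts =>
    let all_zero := (counts.map Prod.snd).foldl (fun b v => if v ≠ 0 then false else b) true
    if all_zero then [""]
    else counts.foldl (fun result p =>
      if p.2 = 0 then result
      else result ++ (pvA fuel (pvDecA p.1 counts)).map (fun s => p.1 ++ s)) []

def permutation_form_counts (counts : List (String × Int)) : List String :=
  pvA (((counts.map Prod.snd).sum).toNat + 1) counts

-- ===== PORT B =====
-- rem2 = dict(rem); rem2[char] = count - 1 : overwrite the first occurrence of the key (append if absent)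
def pvSet (c : String) (v : Int) : List (String × Int) → List (String × Int)
  | [] => [(c, v)]
  | p :: t => if p.1 = c then (c, v) :: t else p :: pvSet c v t

-- one round of the `for _ in range(total)` loop: expand every frontier entry by every positive char
def pvStep (frontier : List (String × List (String × Int))) : List (String × List (String × Int)) :=
  frontier.foldl (fun nxt pr =>
    pr.2.foldl (fun nxt p =>
      if 0 < p.2 then nxt ++ [(pr.1 ++ p.1, pvSet p.1 (p.2 - 1) pr.2)] else nxt) nxt) []

def permutation_form_counts_alt (counts : List (String × Int)) : List String :=
  (pvStep^[((counts.map Prod.snd).sum).toNat] [("", counts)]).map Prod.fst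

-- ===== PRECONDITION & SPEC =====
-- Pre_ excludes lists with duplicate keys (not the image of any Python dict) and negative counts,
-- on which A recurses forever and raises RecursionError.
def Pre_permutation_form_counts (counts : List (String × Int)) : Prop :=
  (counts.map Prod.fst).Nodup ∧ ∀ p ∈ counts, 0 ≤ p.2
instance (counts : List (String × Int)) : Decidable (Pre_permutation_form_counts counts) := by
  unfold Pre_permutation_form_counts; infer_instance

def pvWitness_permutation_form_counts : (List (String × Int)) := [("a", 2), ("b", 1)]

def Spec_permutation_form_counts (counts : List (String × Int)) (out : List String) : Prop :=
  out = permutation_form_counts_alt counts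
instance (counts : List (String × Int)) (out : List String) : Decidable (Spec_permutation_form_counts counts out) := by
  unfold Spec_permutation_form_counts; infer_instance

-- ===== CLAIM (what is proved, stated in full; the proofs are below) =====
def Claim_equal_permutation_form_counts : Prop := ∀ (counts : List (String × Int)), Dom_permutation_form_counts counts → Pre_permutation_form_counts counts → Spec_permutation_form_counts counts (permutation_form_counts counts)

-- ===== LEMMAS AND PROOFS =====

-- A's all_zero loop computes `all values are zero`
lemma pvAllZero_eq (vs : List Int) (b : Bool) :
    vs.foldl (fun b v => if v ≠ 0 then false else b) b = (b && vs.all (· == 0)) := by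
  induction vs generalizing b with
  | nil => simp
  | cons v t ih =>
    simp only [List.foldl_cons, List.all_cons, ih]
    by_cases h : v = 0 <;> simp [h]

lemma pvDecA_keys (c : String) (l : List (String × Int)) :
    (pvDecA c l).map Prod.fst = l.map Prod.fst := by
  induction l with
  | nil => rfl
  | cons p t ih =>
    cases p with | mk k v =>
    by_cases h : k = c <;> simp [pvDecA, h, ih]

lemma pvDecA_nonneg (c : String) (v : Int) (l : List (String × Int))
    (hn : (l.map Prod.fst).Nodup) (hp : ∀ p ∈ l, 0 ≤ p.2)
    (hm : (c, v) ∈ l) (hv : 0 < v) : ∀ q ∈ pvDecA c l, 0 ≤ q.2 := by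
  induction l with
  | nil => simp at hm
  | cons p t ih =>
    cases p with | mk k w =>
    simp only [List.map_cons, List.nodup_cons] at hn
    by_cases h : k = c
    · subst h
      have hw : w = v := by
        rcases List.mem_cons.mp hm with h' | h'
        · exact (Prod.mk.injEq .. ▸ h').2.symm
        · exact absurd (List.mem_map.mpr ⟨_, h', rfl⟩) hn.1
      intro q hq
      simp only [pvDecA] at hq
      rcases List.mem_cons.mp hq with h' | h'
      · subst h'; simp; omega
      · exact hp _ (List.mem_cons_of_mem _ h')
    · have hm' : (c, v) ∈ t := by
        rcases List.mem_cons.mp hm with h' | h'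
        · exact absurd (congrArg Prod.fst h').symm h
        · exact h'
      intro q hq
      simp only [pvDecA, if_neg h] at hq
      rcases List.mem_cons.mp hq with h' | h'
      · subst h'; exact hp _ (List.mem_cons_self)
      · exact ih hn.2 (fun p hp' => hp _ (List.mem_cons_of_mem _ hp')) hm' _ h'

-- B's dict copy-and-set equals A's decrement on a nodup list containing (c, v)
lemma pvSet_eq_pvDecA (c : String) (v : Int) (l : List (String × Int))
    (hn : (l.map Prod.fst).Nodup) (hm : (c, v) ∈ l) :
    pvSet c (v - 1) l = pvDecA c l := by
  induction l with
  | nil => simp at hm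
  | cons p t ih =>
    cases p with | mk k w =>
    simp only [List.map_cons, List.nodup_cons] at hn
    by_cases h : k = c
    · subst h
      have hw : w = v := by
        rcases List.mem_cons.mp hm with h' | h'
        · exact (Prod.mk.injEq .. ▸ h').2.symm
        · exact absurd (List.mem_map.mpr ⟨_, h', rfl⟩) hn.1
      simp [pvSet, pvDecA, hw]
    · have hm' : (c, v) ∈ t := by
        rcases List.mem_cons.mp hm with h' | h'
        · exact absurd (congrArg Prod.fst h').symm h
        · exact h'
      simp [pvSet, pvDecA, h, ih hn.2 hm']

lemma pvDecA_sum (c : String) (l : List (String × Int)) (hm : c ∈ l.map Prod.fst) :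
    ((pvDecA c l).map Prod.snd).sum = (l.map Prod.snd).sum - 1 := by
  induction l with
  | nil => simp at hm
  | cons p t ih =>
    cases p with | mk k w =>
    simp only [List.map_cons, List.mem_cons] at hm
    by_cases h : k = c
    · simp [pvDecA, h]; ring
    · have hm' : c ∈ t.map Prod.fst := by
        rcases hm with h' | h'
        · exact absurd h'.symm h
        · exact h'
      simp only [pvDecA, if_neg h, List.map_cons, List.sum_cons, ih hm']
      ring

lemma allzero_of_sum_zero (l : List Int) (h0 : ∀ v ∈ l, 0 ≤ v) (hs : l.sum = 0) :
    l.all (· == 0) = true := by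
  induction l with
  | nil => rfl
  | cons v t ih =>
    have hv : 0 ≤ v := h0 v List.mem_cons_self
    have ht : 0 ≤ t.sum := List.sum_nonneg (fun x hx => h0 x (List.mem_cons_of_mem _ hx))
    simp only [List.sum_cons] at hs
    have hv0 : v = 0 := by omega
    have hts : t.sum = 0 := by omega
    simp [hv0, ih (fun x hx => h0 x (List.mem_cons_of_mem _ hx)) hts]

lemma sum_zero_of_allzero (l : List Int) (h : l.all (· == 0) = true) : l.sum = 0 := by
  induction l with
  | nil => rfl
  | cons v t ih =>
    simp only [List.all_cons, Bool.and_eq_true, beq_iff_eq] at h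
    simp [h.1, ih h.2]

-- children of one frontier entry, in iteration order
def pvChildren (pr : String × List (String × Int)) : List (String × List (String × Int)) :=
  (pr.2.filter (fun p => decide (0 < p.2))).map (fun p => (pr.1 ++ p.1, pvSet p.1 (p.2 - 1) pr.2))

lemma pvStep_eq (F : List (String × List (String × Int))) : pvStep F = F.flatMap pvChildren := by
  unfold pvStep
  have hfn : (fun (nxt : List (String × List (String × Int))) pr =>
      pr.2.foldl (fun nxt p =>
        if 0 < p.2 then nxt ++ [(pr.1 ++ p.1, pvSet p.1 (p.2 - 1) pr.2)] else nxt) nxt)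
      = (fun nxt pr => nxt ++ pvChildren pr) := by
    funext nxt pr
    exact PySem.List.foldl_append_ite (fun (p : String × Int) => 0 < p.2) _ _ _
  rw [hfn]
  exact PySem.List.foldl_append_eq_flatMap _ _ _

lemma filter_flatMap_ite {α β : Type} (q : α → Bool) (g : α → List β) (l : List α) :
    (l.filter q).flatMap g = l.flatMap (fun x => if q x then g x else []) := by
  induction l with
  | nil => rfl
  | cons x t ih =>
    by_cases h : q x <;> simp [h, ih]

-- the per-entry contribution of A's loop
def pvG (fuel : Nat) (counts : List (String × Int)) (p : String × Int) : List String :=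
  if p.2 = 0 then [] else (pvA fuel (pvDecA p.1 counts)).map (fun s => p.1 ++ s)

lemma pvFoldA_eq (fuel : Nat) (counts : List (String × Int)) (l : List (String × Int)) (r : List String) :
    l.foldl (fun result p =>
      if p.2 = 0 then result
      else result ++ (pvA fuel (pvDecA p.1 counts)).map (fun s => p.1 ++ s)) r
    = r ++ l.flatMap (pvG fuel counts) := by
  have hf : (fun (result : List String) (p : String × Int) =>
      if p.2 = 0 then result
      else result ++ (pvA fuel (pvDecA p.1 counts)).map (fun s => p.1 ++ s))
      = (fun result p => result ++ pvG fuel counts p) := by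
    funext result p; unfold pvG; split <;> simp
  rw [hf]
  exact PySem.List.foldl_append_eq_flatMap _ _ _

lemma pvA_succ (fuel : Nat) (counts : List (String × Int)) :
    pvA (fuel+1) counts =
      if ((counts.map Prod.snd).all (· == 0)) then [""]
      else counts.flatMap (pvG fuel counts) := by
  conv_lhs => rw [pvA]
  rw [pvAllZero_eq, pvFoldA_eq, Bool.true_and, List.nil_append]

-- main invariant: n rounds of pvStep on a frontier of weight-n entries yield A's results per entry
lemma pvIter_eq (n : Nat) : ∀ (F : List (String × List (String × Int))),
    (∀ pr ∈ F, (pr.2.map Prod.fst).Nodup ∧ (∀ p ∈ pr.2, 0 ≤ p.2) ∧ (pr.2.map Prod.snd).sum = (n : Int)) →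
    (pvStep^[n] F).map Prod.fst = F.flatMap (fun pr => (pvA (n+1) pr.2).map (fun s => pr.1 ++ s)) := by
  induction n with
  | zero =>
    intro F hF
    simp only [Function.iterate_zero, id]
    induction F with
    | nil => rfl
    | cons pr t ih =>
      have h := hF pr List.mem_cons_self
      have hz : ((pr.2.map Prod.snd).all (· == 0)) = true :=
        allzero_of_sum_zero _ (by intro v hv; rcases List.mem_map.mp hv with ⟨q, hq, rfl⟩; exact h.2.1 q hq) (by simpa using h.2.2)
      have hA : pvA 1 pr.2 = [""] := by
        have := pvA_succ 0 pr.2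
        simpa [hz] using this
      simp only [List.flatMap_cons, List.map_cons, hA]
      rw [← ih (fun q hq => hF q (List.mem_cons_of_mem _ hq))]
      simp
  | succ n ih =>
    intro F hF
    rw [Function.iterate_succ_apply, pvStep_eq]
    have hchild : ∀ pr ∈ F, ∀ ch ∈ pvChildren pr,
        (ch.2.map Prod.fst).Nodup ∧ (∀ p ∈ ch.2, 0 ≤ p.2) ∧ (ch.2.map Prod.snd).sum = (n : Int) := by
      intro pr hpr ch hch
      obtain ⟨hn, hp, hs⟩ := hF pr hpr
      unfold pvChildren at hch
      rcases List.mem_map.mp hch with ⟨p, hpf, rfl⟩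
      have hpmem : p ∈ pr.2 := List.mem_of_mem_filter hpf
      have hpos : 0 < p.2 := by
        have := List.of_mem_filter hpf; simpa using this
      have hdec : pvSet p.1 (p.2 - 1) pr.2 = pvDecA p.1 pr.2 :=
        pvSet_eq_pvDecA p.1 p.2 pr.2 hn (by simpa using hpmem)
      refine ⟨?_, ?_, ?_⟩
      · simpa [hdec, pvDecA_keys] using hn
      · simpa [hdec] using pvDecA_nonneg p.1 p.2 pr.2 hn hp (by simpa using hpmem) hpos
      · simp only [hdec]
        rw [pvDecA_sum p.1 pr.2 (List.mem_map.mpr ⟨p, hpmem, rfl⟩), hs]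
        push_cast; ring
    rw [ih _ (fun ch hch => by
      rcases List.mem_flatMap.mp hch with ⟨pr, hpr, hin⟩
      exact hchild pr hpr ch hin)]
    rw [List.flatMap_assoc]
    apply List.flatMap_congr
    intro pr hpr
    obtain ⟨hn, hp, hs⟩ := hF pr hpr
    -- left side: children of pr expanded
    unfold pvChildren
    rw [List.flatMap_map, filter_flatMap_ite]
    -- right side: unfold pvA (n+2)
    have hnz : ((pr.2.map Prod.snd).all (· == 0)) = false := by
      by_contra hcon
      have : (pr.2.map Prod.snd).all (· == 0) = true := by
        cases hb : (pr.2.map Prod.snd).all (· == 0) with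
        | false => exact absurd hb hcon
        | true => rfl
      have := sum_zero_of_allzero _ this
      rw [hs] at this
      omega
    have hA : pvA (n+2) pr.2 = pr.2.flatMap (pvG (n+1) pr.2) := by
      have := pvA_succ (n+1) pr.2
      simpa [hnz] using this
    rw [hA, List.map_flatMap]
    apply List.flatMap_congr
    intro p hpm
    have hp0 : 0 ≤ p.2 := hp p hpm
    by_cases hz : p.2 = 0
    · simp [pvG, hz]
    · have hpos : 0 < p.2 := by omega
      have hdec : pvSet p.1 (p.2 - 1) pr.2 = pvDecA p.1 pr.2 :=
        pvSet_eq_pvDecA p.1 p.2 pr.2 hn (by simpa using hpm)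
      simp only [hpos, decide_true, if_pos, pvG, if_neg hz, hdec, List.map_map]
      apply List.map_congr_left
      intro s _
      simp [Function.comp, String.append_assoc]

-- ===== VERDICT (by name: the statement is the Claim_ definition above) =====
theorem permutation_form_counts_spec : Claim_equal_permutation_form_counts := by
  intro counts _ hpre
  unfold Spec_permutation_form_counts permutation_form_counts permutation_form_counts_alt
  have hsum : 0 ≤ (counts.map Prod.snd).sum :=
    List.sum_nonneg (by intro v hv; rcases List.mem_map.mp hv with ⟨q, hq, rfl⟩; exact hpre.2 q hq)
  have h := pvIter_eq ((counts.map Prod.snd).sum).toNat [("", counts)]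
    (by
      intro pr hpr
      simp only [List.mem_singleton] at hpr
      subst hpr
      exact ⟨hpre.1, hpre.2, by rw [Int.toNat_of_nonneg hsum]⟩)
  rw [h]
  simp [String.empty_append]
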